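-- pv_equiv track=rewrite | github.com/Shashank7892/LeetCode_problems | solve1.py | solve
-- ===== SOURCE A (Python) =====
-- def solve(s,ch):
--     newstr=""
--
--     if ch not in s:
--         return s
--     else:
--         a=s.index(ch)
--         for i in s:
--             if i==ch:
--                 newstr=i+newstr
--                 break
--             newstr=i+newstr
--
--
--         for d in range(a+1,len(s)):
--             newstr+=s[d]
--
--         return newstr
-- ===== SOURCE B (Python) =====
-- def solve(s, ch):
--     if ch not in s:
--         return s
--     arr = list(s)
--     i, j = 0, arr.index(ch)
--     while i < j:
--         arr[i], arr[j] = arr[j], arr[i]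
--         i += 1
--         j -= 1
--     return ''.join(arr)
-- ===== Notes on version B (the rewrite author's own statement) =====
-- stated objective: alternative
-- what changed: Replaces A's two loops (char-by-char string prepending, then index-by-index string appending of the tail) by an in-place two-pointer swap reversing the prefix of a char list followed by one join; Pre_ excludes multi-character or empty ch occurring in s, where B's arr.index(ch) raises ValueError while A happens to reverse the whole string.
-- outside the precondition, e.g. on solve('abc', 'ab'): A returns 'cbabc', B raises ValueError; on solve('abc', ''): A returns 'cbabc', B raises ValueError
import Mathlib
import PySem

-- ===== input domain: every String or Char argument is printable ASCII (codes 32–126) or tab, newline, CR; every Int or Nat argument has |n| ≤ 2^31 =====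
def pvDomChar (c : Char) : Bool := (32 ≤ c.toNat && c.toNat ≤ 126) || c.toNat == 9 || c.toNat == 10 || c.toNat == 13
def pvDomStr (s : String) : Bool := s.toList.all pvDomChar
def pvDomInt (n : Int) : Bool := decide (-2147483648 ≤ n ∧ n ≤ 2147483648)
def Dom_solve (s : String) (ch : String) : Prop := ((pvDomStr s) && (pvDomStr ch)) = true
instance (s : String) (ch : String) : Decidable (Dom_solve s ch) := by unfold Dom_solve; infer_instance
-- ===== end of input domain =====

-- B replaces A's string prepend/append loops by an in-place two-pointer prefix swap on a char list and one join (alternative algorithm); Pre_ excludes multi-char/empty ch occurring in s, where B's arr.index raises ValueError.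

-- ===== PORT A =====
-- A's first loop: 'for i in s: if i==ch: newstr=i+newstr; break; newstr=i+newstr'
-- (i is a 1-char string, so i==ch tests [c] = ch.toList)
def solveRevLoop : List Char → List Char → List Char → List Char
  | [], _, newstr => newstr
  | c :: rest, chL, newstr =>
    if [c] = chL then c :: newstr
    else solveRevLoop rest chL (c :: newstr)

def solve (s : String) (ch : String) : String :=
  if PySem.Str.isIn ch s = false then s
  else
    -- s.index(ch): ch occurs in s on this branch, so index = find (no ValueError)
    let a : Int := PySem.Str.find s ch
    let newstr := solveRevLoop s.toList ch.toList []
    let newstr := (PySem.List.pyRange (a + 1) (PySem.Str.len s) 1).foldl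
      (fun acc d => acc ++ [PySem.List.pyGetD s.toList d ' ']) newstr
    String.ofList newstr

-- ===== PORT B =====
-- 'while i < j: arr[i], arr[j] = arr[j], arr[i]; i += 1; j -= 1'
-- (fuel j - i is a totality guard only: it never runs out while i < j)
def solveSwapGo : Nat → List Char → Nat → Nat → List Char
  | 0, arr, _, _ => arr
  | fuel + 1, arr, i, k =>
    if i < k then
      let vi := PySem.List.pyGetD arr (i : Int) ' '
      let vk := PySem.List.pyGetD arr (k : Int) ' '
      solveSwapGo fuel (PySem.List.pySetD (PySem.List.pySetD arr (i : Int) vk) (k : Int) vi) (i + 1) (k - 1)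
    else arr

def solveSwapLoop (arr : List Char) (i k : Nat) : List Char :=
  solveSwapGo (k - i) arr i k

def solve_alt (s : String) (ch : String) : String :=
  if PySem.Str.isIn ch s = false then s
  else
    let arr := s.toList
    -- arr.index(ch): first list element equal to ch ([c] = ch.toList); none = ValueError, outside Pre_
    match arr.findIdx? (fun c => decide ([c] = ch.toList)) with
    | none => s  -- ValueError (excluded by Pre_solve)
    | some j => String.ofList (solveSwapLoop arr 0 j)

-- ===== PRECONDITION & SPEC =====
-- Pre_ excludes inputs where ch occurs in s as a substring but is not a single character
-- (empty or multi-character ch): there B's arr.index(ch) raises ValueError while A returns a value.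
def Pre_solve (s : String) (ch : String) : Prop :=
  PySem.Str.len ch = 1 ∨ PySem.Str.isIn ch s = false
instance (s : String) (ch : String) : Decidable (Pre_solve s ch) := by unfold Pre_solve; infer_instance
def pvWitness_solve : String × String := ("banana", "n")

def Spec_solve (s : String) (ch : String) (out : String) : Prop := out = solve_alt s ch
instance (s : String) (ch : String) (out : String) : Decidable (Spec_solve s ch out) := by unfold Spec_solve; infer_instance

-- ===== CLAIM (what is proved, stated in full; the proofs are below) =====
def Claim_equal_solve : Prop := ∀ (s : String) (ch : String), Dom_solve s ch → Pre_solve s ch → Spec_solve s ch (solve s ch)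

-- ===== LEMMAS AND PROOFS =====

-- getD / set at the junction of an append split
theorem pvGetDMid (P t : List Char) (c d : Char) : (P ++ c :: t).getD P.length d = c := by
  induction P with
  | nil => rfl
  | cons p P ih => simp

theorem pvSetMid (P t : List Char) (c v : Char) : (P ++ c :: t).set P.length v = P ++ v :: t := by
  induction P with
  | nil => rfl
  | cons p P ih => simp [ih]

-- A's first loop when t is the first matching character
theorem pvRevLoopHit (pre suf : List Char) (t : Char) (acc : List Char) (h : t ∉ pre) :
    solveRevLoop (pre ++ t :: suf) [t] acc = t :: (pre.reverse ++ acc) := by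
  induction pre generalizing acc with
  | nil => simp [solveRevLoop]
  | cons p pre ih =>
    have hp : ¬ ([p] = [t]) := by
      simp only [List.cons.injEq, and_true]
      exact fun hpt => h (by simp [hpt])
    simp only [List.cons_append, solveRevLoop, if_neg hp]
    rw [ih _ (fun hm => h (List.mem_cons_of_mem _ hm))]
    simp

-- findIdx? at the first hit
theorem pvFindIdxHit (p : Char → Bool) (pre suf : List Char) (t : Char)
    (hpre : ∀ c ∈ pre, p c = false) (ht : p t = true) :
    List.findIdx? p (pre ++ t :: suf) = some pre.length := by
  induction pre with
  | nil => simp [List.findIdx?_cons, ht]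
  | cons c pre ih =>
    have hc : p c = false := hpre c (by simp)
    simp [List.findIdx?_cons, hc, ih (fun x hx => hpre x (by simp [hx]))]

-- B's two-pointer loop reverses the middle segment
theorem pvSwapGoSeg : ∀ (n fuel : Nat) (M P S : List Char), M.length = n → M.length - 1 ≤ fuel →
    solveSwapGo fuel (P ++ M ++ S) P.length (P.length + M.length - 1) = P ++ M.reverse ++ S := by
  intro n
  induction n using Nat.strong_induction_on with
  | _ n ih =>
    intro fuel M P S hlen hfuel
    match M with
    | [] =>
      cases fuel with
      | zero => simp [solveSwapGo]
      | succ f =>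
        rw [solveSwapGo, if_neg (by simp only [List.length_nil]; omega)]
        simp
    | [x] =>
      cases fuel with
      | zero => simp [solveSwapGo]
      | succ f =>
        rw [solveSwapGo, if_neg (by simp only [List.length_cons, List.length_nil]; omega)]
        simp
    | x :: y :: rest =>
      obtain ⟨mid, z, hmz⟩ : ∃ mid z, y :: rest = mid ++ [z] := by
        rcases (y :: rest).eq_nil_or_concat with h | ⟨l', b, h⟩
        · exact absurd h (by simp)
        · exact ⟨l', b, by simpa [List.concat_eq_append] using h⟩
      have hlenM : (x :: y :: rest).length = mid.length + 2 := by
        rw [show (x :: y :: rest) = x :: (y :: rest) from rfl, hmz]; simp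
      cases fuel with
      | zero => exfalso; omega
      | succ f =>
        rw [hmz, solveSwapGo, if_pos (by simp only [List.length_cons, List.length_append, List.length_nil]; omega)]
        have e1 : P ++ (x :: (mid ++ [z])) ++ S = P ++ x :: (mid ++ z :: S) := by simp
        have e2 : P ++ (x :: (mid ++ [z])) ++ S = (P ++ x :: mid) ++ z :: S := by simp
        have hj : P.length + (x :: (mid ++ [z])).length - 1 = (P ++ x :: mid).length := by
          simp only [List.length_cons, List.length_append, List.length_nil]; omega
        have hvi : PySem.List.pyGetD (P ++ (x :: (mid ++ [z])) ++ S) ((P.length : Nat) : Int) ' ' = x := by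
          rw [PySem.List.pyGetD_natCast, e1, pvGetDMid]
        have hvj : PySem.List.pyGetD (P ++ (x :: (mid ++ [z])) ++ S)
            ((P.length + (x :: (mid ++ [z])).length - 1 : Nat) : Int) ' ' = z := by
          rw [PySem.List.pyGetD_natCast, hj, e2, pvGetDMid]
        have hinner : PySem.List.pySetD (P ++ (x :: (mid ++ [z])) ++ S) ((P.length : Nat) : Int) z
            = P ++ z :: (mid ++ z :: S) := by
          rw [PySem.List.pySetD_natCast, e1, pvSetMid]
        have hset : PySem.List.pySetD
            (PySem.List.pySetD (P ++ (x :: (mid ++ [z])) ++ S) ((P.length : Nat) : Int) z)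
            ((P.length + (x :: (mid ++ [z])).length - 1 : Nat) : Int) x
            = (P ++ [z]) ++ mid ++ (x :: S) := by
          rw [hinner, PySem.List.pySetD_natCast, hj]
          have e3 : P ++ z :: (mid ++ z :: S) = (P ++ z :: mid) ++ z :: S := by simp
          have hlen2 : (P ++ x :: mid).length = (P ++ z :: mid).length := by simp
          rw [e3, hlen2, pvSetMid]
          simp
        simp only [hvi, hvj]
        rw [hset]
        have hidx1 : P.length + 1 = (P ++ [z]).length := by simp
        have hidx2 : P.length + (x :: (mid ++ [z])).length - 1 - 1 = (P ++ [z]).length + mid.length - 1 := by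
          simp only [List.length_cons, List.length_append, List.length_nil]; omega
        rw [hidx1, hidx2]
        rw [ih mid.length (by omega) f mid (P ++ [z]) (x :: S) rfl (by omega)]
        simp

-- the second loop of A appends the tail of l
theorem pvTailLoop (l : List Char) (k : Nat) (acc : List Char) :
    (PySem.List.pyRange ((k : Int) + 1) ((l.length : Int)) 1).foldl
      (fun acc d => acc ++ [PySem.List.pyGetD l d ' ']) acc = acc ++ l.drop (k + 1) := by
  rw [PySem.List.foldl_pyRange_pyGetD' l ' ' (fun acc x => acc ++ [x]) acc (by omega)]
  rw [PySem.List.foldl_append_singleton_eq_self]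
  congr 1

-- ===== VERDICT (by name: the statement is the Claim_ definition above) =====
theorem solve_spec : Claim_equal_solve := by
  intro s ch _ hpre
  unfold Spec_solve
  by_cases hin : PySem.Str.isIn ch s = true
  · have hinf : ch.toList <:+: s.toList := (PySem.Str.isIn_iff_infix ch s).mp hin
    have hlen1 : PySem.Str.len ch = 1 := by
      rcases hpre with h | h
      · exact h
      · rw [hin] at h; cases h
    rw [PySem.Str.len_eq] at hlen1
    obtain ⟨t, ht⟩ : ∃ t, ch.toList = [t] := by
      rcases hct : ch.toList with _ | ⟨c0, cs⟩
      · exfalso; rw [hct] at hlen1; simp at hlen1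
      · rcases cs with _ | ⟨c1, cs⟩
        · exact ⟨c0, rfl⟩
        · exfalso; rw [hct] at hlen1; simp at hlen1; omega
    unfold solve solve_alt
    rw [if_neg (by rw [hin]; simp), if_neg (by rw [hin]; simp)]
    simp only [PySem.Str.find_eq, PySem.Str.len_eq]
    rw [ht] at hinf
    have hfnn : 0 ≤ PySem.Chars.find s.toList ch.toList := by
      rw [ht]; exact (PySem.Chars.find_nonneg_iff _ _).mpr hinf
    set k : Nat := (PySem.Chars.find s.toList ch.toList).toNat with hk
    have hcast : PySem.Chars.find s.toList ch.toList = (k : Int) := by omega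
    rw [hcast, pvTailLoop]
    have hk' : k = (PySem.Chars.find s.toList [t]).toNat := by rw [hk, ht]
    obtain ⟨hpre2, hmin⟩ := PySem.Chars.find_spec ((PySem.Chars.find_nonneg_iff _ _).mpr hinf)
    rw [← hk'] at hpre2 hmin
    have hkn : k < s.toList.length := by
      by_contra hge
      rw [List.drop_eq_nil_of_le (by omega)] at hpre2
      simp at hpre2
    obtain ⟨u, hu⟩ := hpre2
    have hdrop : s.toList.drop k = t :: u := by rw [← hu]; rfl
    have hu2 : s.toList.drop (k + 1) = u := by
      have h := congrArg List.tail hdrop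
      simpa [List.tail_drop] using h
    have hsplit : s.toList = s.toList.take k ++ t :: s.toList.drop (k + 1) := by
      rw [hu2, ← hdrop, List.take_append_drop]
    have hlt : (s.toList.take k).length = k := by rw [List.length_take]; omega
    have hnotin : t ∉ s.toList.take k := by
      intro hmem
      obtain ⟨i, hi, hit⟩ := List.getElem_of_mem hmem
      have hilt : i < k := by omega
      have hiltn : i < s.toList.length := by omega
      apply hmin i hilt
      have hgi : s.toList[i] = t := by
        rw [← hit, List.getElem_take]
      rw [List.drop_eq_getElem_cons hiltn, hgi]
      exact ⟨_, rfl⟩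
    have hfi : s.toList.findIdx? (fun c => decide ([c] = ch.toList)) = some k := by
      conv_lhs => rw [hsplit]
      rw [ht]
      rw [pvFindIdxHit _ _ _ t (fun c hc => by
            simp only [decide_eq_false_iff_not, List.cons.injEq, and_true]
            exact fun hct => hnotin (hct ▸ hc)) (by simp), hlt]
    have hA : solveRevLoop s.toList ch.toList [] = t :: (s.toList.take k).reverse := by
      conv_lhs => rw [hsplit, ht]
      rw [pvRevLoopHit _ _ _ _ hnotin]; simp
    have hMlen : (s.toList.take (k + 1)).length = k + 1 := by
      rw [List.length_take]; omega
    have hB : solveSwapLoop s.toList 0 k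
        = (s.toList.take (k + 1)).reverse ++ s.toList.drop (k + 1) := by
      have hg := pvSwapGoSeg (k + 1) k (s.toList.take (k + 1)) [] (s.toList.drop (k + 1))
        hMlen (by rw [hMlen]; omega)
      simp only [List.length_nil, hMlen, List.nil_append, Nat.zero_add, List.take_append_drop] at hg
      rw [solveSwapLoop]
      simpa using hg
    have hgk : s.toList[k]? = some t := by
      have h0 : (s.toList.drop k)[0]? = some t := by rw [hdrop]; rfl
      rw [List.getElem?_drop] at h0
      simpa using h0
    have htk : s.toList.take (k + 1) = s.toList.take k ++ [t] := by
      rw [List.take_add_one, hgk]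
      rfl
    simp only [hfi]
    rw [hA, hB, htk]
    simp
  · have hf : PySem.Str.isIn ch s = false := by
      revert hin; cases PySem.Str.isIn ch s <;> simp
    unfold solve solve_alt
    rw [if_pos hf, if_pos hf]
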